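-- pv_equiv track=rewrite | github.com/Keylay-keys/order_forecast | scripts/catalog_upload_listener.py | _infer_category_from_header
-- ===== SOURCE A (Python) =====
-- def _infer_category_from_header(header: str) -> str:
--     h = (header or "").strip().lower()
--     if not h:
--         return "uncategorized"
--     retailer_words = ("walmart", "target", "kroger", "safeway", "albertsons", "chef", "us foods")
--     if any(w in h for w in retailer_words):
--         return "private_label"
--     if "club" in h:
--         return "club"
--     if "chip" in h or "chicharr" in h or "salsa" in h or "dip" in h:
--         return "chips"
--     if "tostad" in h:
--         return "tostada"
--     if "wrap" in h:
--         return "wraps"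
--     if "corn" in h or "maiz" in h:
--         return "corn"
--     if "flour" in h or "wheat" in h:
--         return "flour"
--     return "uncategorized"
-- ===== SOURCE B (Python) =====
-- def _infer_category_from_header(header: str) -> str:
--     h = (header or "").strip().lower()
--     labels = ("private_label", "club", "chips", "tostada", "wraps", "corn", "flour")
--     kw = {
--         "walmart": 0, "target": 0, "kroger": 0, "safeway": 0,
--         "albertsons": 0, "chef": 0, "us foods": 0,
--         "club": 1,
--         "chip": 2, "chicharr": 2, "salsa": 2, "dip": 2,
--         "tostad": 3,
--         "wrap": 4,
--         "corn": 5, "maiz": 5,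
--         "flour": 6, "wheat": 6,
--     }
--     best = 7
--     for i in range(len(h)):
--         for k, p in kw.items():
--             if p < best and h[i:i + len(k)] == k:
--                 best = p
--     return labels[best] if best < 7 else "uncategorized"
-- ===== Notes on version B (the rewrite author's own statement) =====
-- stated objective: alternative
-- what changed: Replaces the per-category substring if-cascade by a single positional scan: one keyword->priority map, one pass over every start position of the header checking slice equality, keeping the minimum matched priority, and indexing a label table at the end (no early returns, no per-branch 'in' searches).
import Mathlib
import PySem

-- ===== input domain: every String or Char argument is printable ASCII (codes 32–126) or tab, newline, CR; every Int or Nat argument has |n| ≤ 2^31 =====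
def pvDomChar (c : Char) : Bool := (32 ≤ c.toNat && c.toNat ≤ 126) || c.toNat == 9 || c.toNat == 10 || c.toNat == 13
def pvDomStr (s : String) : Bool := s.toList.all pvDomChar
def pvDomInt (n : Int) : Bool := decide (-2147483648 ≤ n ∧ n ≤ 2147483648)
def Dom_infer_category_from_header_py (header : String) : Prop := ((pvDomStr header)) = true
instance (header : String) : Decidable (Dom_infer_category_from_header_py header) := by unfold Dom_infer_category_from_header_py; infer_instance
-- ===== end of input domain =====

-- B replaces A's substring if-cascade by a positional scan keeping the minimum matched keyword priority (alternative algorithm, same cost); return value only, no side effects.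


-- ===== PORT A =====
def infer_category_from_header_py (header : String) : String :=
  let h := PySem.Str.lower (PySem.Str.strip (if header = "" then "" else header))
  if h = "" then "uncategorized"
  else if ["walmart", "target", "kroger", "safeway", "albertsons", "chef", "us foods"].any
            (fun w => PySem.Str.isIn w h) then "private_label"
  else if PySem.Str.isIn "club" h then "club"
  else if PySem.Str.isIn "chip" h || PySem.Str.isIn "chicharr" h || PySem.Str.isIn "salsa" h
          || PySem.Str.isIn "dip" h then "chips"
  else if PySem.Str.isIn "tostad" h then "tostada"
  else if PySem.Str.isIn "wrap" h then "wraps"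
  else if PySem.Str.isIn "corn" h || PySem.Str.isIn "maiz" h then "corn"
  else if PySem.Str.isIn "flour" h || PySem.Str.isIn "wheat" h then "flour"
  else "uncategorized"

-- ===== PORT B =====
-- Source B's tuple of labels and keyword -> priority dict (constant, no overwritten keys)
def pvLabels : List String :=
  ["private_label", "club", "chips", "tostada", "wraps", "corn", "flour"]

def pvKw : List (String × Nat) :=
  [("walmart", 0), ("target", 0), ("kroger", 0), ("safeway", 0),
   ("albertsons", 0), ("chef", 0), ("us foods", 0),
   ("club", 1),
   ("chip", 2), ("chicharr", 2), ("salsa", 2), ("dip", 2),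
   ("tostad", 3),
   ("wrap", 4),
   ("corn", 5), ("maiz", 5),
   ("flour", 6), ("wheat", 6)]

-- inner loop of Source B: 'for k, p in kw.items(): if p < best and h[i:i+len(k)] == k: best = p'
def pvInner (h : String) (best : Nat) (i : Int) : Nat :=
  pvKw.foldl
    (fun b kp =>
      if kp.2 < b ∧ PySem.Str.slice h (some i) (some (i + PySem.Str.len kp.1)) = kp.1
      then kp.2 else b)
    best

-- outer loop of Source B: 'for i in range(len(h)): …'
def pvBest (h : String) : Nat :=
  (PySem.List.pyRange 0 (PySem.Str.len h) 1).foldl (pvInner h) 7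

def infer_category_from_header_py_alt (header : String) : String :=
  let h := PySem.Str.lower (PySem.Str.strip (if header = "" then "" else header))
  let best := pvBest h
  if best < 7 then (PySem.List.pyGet? pvLabels (best : Int)).getD "uncategorized"
  else "uncategorized"

-- ===== PRECONDITION & SPEC =====
def Spec_infer_category_from_header_py (header : String) (out : String) : Prop :=
  out = infer_category_from_header_py_alt header
instance (header : String) (out : String) : Decidable (Spec_infer_category_from_header_py header out) := by
  unfold Spec_infer_category_from_header_py; infer_instance

-- ===== CLAIM =====
def Claim_equal_infer_category_from_header_py : Prop :=
  ∀ (header : String), Dom_infer_category_from_header_py header →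
    Spec_infer_category_from_header_py header (infer_category_from_header_py header)

-- ===== LEMMAS AND PROOFS =====

-- the cascade's priority (0..6 = index into pvLabels, 7 = no match); conditions are A's, verbatim
def pvPri (h : String) : Nat :=
  if ["walmart", "target", "kroger", "safeway", "albertsons", "chef", "us foods"].any
       (fun w => PySem.Str.isIn w h) then 0
  else if PySem.Str.isIn "club" h then 1
  else if PySem.Str.isIn "chip" h || PySem.Str.isIn "chicharr" h || PySem.Str.isIn "salsa" h
          || PySem.Str.isIn "dip" h then 2
  else if PySem.Str.isIn "tostad" h then 3
  else if PySem.Str.isIn "wrap" h then 4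
  else if PySem.Str.isIn "corn" h || PySem.Str.isIn "maiz" h then 5
  else if PySem.Str.isIn "flour" h || PySem.Str.isIn "wheat" h then 6
  else 7

theorem pvPri_le_seven (h : String) : pvPri h ≤ 7 := by
  unfold pvPri; split_ifs <;> omega

-- a slice with nonneg start is an infix, hence a matched keyword occurs in h
theorem occ_of_match (h : String) (i : Int) (hi : 0 ≤ i) (k : String)
    (hm : PySem.Str.slice h (some i) (some (i + PySem.Str.len k)) = k) :
    PySem.Str.isIn k h = true := by
  have hlist : PySem.Chars.slice h.toList (some i) (some (i + PySem.Str.len k)) = k.toList := by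
    rw [← PySem.Str.toList_slice, hm]
  rw [PySem.Chars.slice_eq_listSlice] at hlist
  rw [PySem.List.slice_toNat] at hlist
  have hinf : k.toList <:+: h.toList := by
    rw [← hlist]
    exact ((List.take_prefix _ _).isInfix.trans (List.drop_suffix _ _).isInfix)
  rw [PySem.Str.isIn_eq, PySem.Chars.isIn_iff_infix]
  exact hinf
  exact hi
  have hlen : (0 : Int) ≤ PySem.Str.len k := by simp [PySem.Str.len_eq]
  omega

-- a keyword of priority p occurring in h forces the cascade to fire at level ≤ p
theorem pri_le_of_occ (h : String) (kp : String × Nat) (hmem : kp ∈ pvKw)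
    (hocc : PySem.Str.isIn kp.1 h = true) : pvPri h ≤ kp.2 := by
  unfold pvPri
  fin_cases hmem <;> simp_all <;> split_ifs <;> simp_all

-- proof-side name for the body of Source B's inner loop
def pvStep (h : String) (i : Int) (b : Nat) (kp : String × Nat) : Nat :=
  if kp.2 < b ∧ PySem.Str.slice h (some i) (some (i + PySem.Str.len kp.1)) = kp.1
  then kp.2 else b

theorem pvInner_eq (h : String) (b : Nat) (i : Int) :
    pvInner h b i = pvKw.foldl (pvStep h i) b := rfl

theorem pvStep_le (h : String) (i : Int) (b : Nat) (kp : String × Nat) :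
    pvStep h i b kp ≤ b := by
  unfold pvStep
  split_ifs with hc
  · exact le_of_lt hc.1
  · exact le_refl b

theorem foldl_pvStep_le (h : String) (i : Int) (l : List (String × Nat)) (b : Nat) :
    l.foldl (pvStep h i) b ≤ b := by
  refine List.foldlRecOn (motive := fun x => x ≤ b) l (pvStep h i) (le_refl b) ?_
  intro x hx kp _
  exact le_trans (pvStep_le h i x kp) hx

theorem pvInner_le (h : String) (b : Nat) (i : Int) : pvInner h b i ≤ b := by
  rw [pvInner_eq]
  exact foldl_pvStep_le h i pvKw b

theorem foldl_pvInner_le (h : String) (l : List Int) (b : Nat) :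
    l.foldl (pvInner h) b ≤ b := by
  refine List.foldlRecOn (motive := fun x => x ≤ b) l (pvInner h) (le_refl b) ?_
  intro x hx i _
  exact le_trans (pvInner_le h x i) hx

-- lower bound: every value the scan ever writes is ≥ pvPri h
theorem pvPri_le_pvBest (h : String) : pvPri h ≤ pvBest h := by
  unfold pvBest
  refine List.foldlRecOn (motive := fun x => pvPri h ≤ x) _ _ (pvPri_le_seven h) ?_
  intro b hb i hi
  have hi0 : 0 ≤ i := (PySem.List.mem_pyRange_one.mp hi).1
  rw [pvInner_eq]
  refine List.foldlRecOn (motive := fun x => pvPri h ≤ x) pvKw (pvStep h i) hb ?_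
  intro x hx kp hkp
  unfold pvStep
  split_ifs with hc
  · exact pri_le_of_occ h kp hkp (occ_of_match h i hi0 kp.1 hc.2)
  · exact hx

-- upper bound at a matched pair: once the scan visits it, the accumulator is ≤ its priority
theorem pvStep_le_of_match (h : String) (i : Int) (b : Nat) (kp : String × Nat)
    (hm : PySem.Str.slice h (some i) (some (i + PySem.Str.len kp.1)) = kp.1) :
    pvStep h i b kp ≤ kp.2 := by
  unfold pvStep
  split_ifs with hc
  · exact le_refl _
  · rw [not_and] at hc
    exact Nat.le_of_not_lt (fun hlt => (hc hlt) hm)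

theorem pvInner_le_of_match (h : String) (b : Nat) (i : Int) (kp : String × Nat)
    (hmem : kp ∈ pvKw)
    (hm : PySem.Str.slice h (some i) (some (i + PySem.Str.len kp.1)) = kp.1) :
    pvInner h b i ≤ kp.2 := by
  obtain ⟨l1, l2, hsplit⟩ := List.append_of_mem hmem
  rw [pvInner_eq, hsplit, List.foldl_append, List.foldl_cons]
  exact le_trans (foldl_pvStep_le h i l2 _) (pvStep_le_of_match h i _ kp hm)

theorem pvBest_le_of_match (h : String) (i : Int) (kp : String × Nat)
    (hi : i ∈ PySem.List.pyRange 0 (PySem.Str.len h) 1) (hmem : kp ∈ pvKw)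
    (hm : PySem.Str.slice h (some i) (some (i + PySem.Str.len kp.1)) = kp.1) :
    pvBest h ≤ kp.2 := by
  obtain ⟨l1, l2, hsplit⟩ := List.append_of_mem hi
  unfold pvBest
  rw [hsplit, List.foldl_append, List.foldl_cons]
  exact le_trans (foldl_pvInner_le h l2 _) (pvInner_le_of_match h _ i kp hmem hm)

-- an occurring keyword yields a matched position inside range(len(h))
theorem match_of_occ (h : String) (k : String) (hk : k ≠ "")
    (hocc : PySem.Str.isIn k h = true) :
    ∃ i ∈ PySem.List.pyRange 0 (PySem.Str.len h) 1,
      PySem.Str.slice h (some i) (some (i + PySem.Str.len k)) = k := by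
  rw [PySem.Str.isIn_eq, ← PySem.Chars.exists_prefix_drop_iff_isIn] at hocc
  obtain ⟨j, hj⟩ := hocc
  have hknil : k.toList ≠ [] := by
    intro hnil
    exact hk (String.toList_injective (by simp [hnil]))
  have hjlt : j < h.toList.length := by
    by_contra hge
    rw [List.drop_eq_nil_of_le (by omega)] at hj
    exact hknil (List.prefix_nil.mp hj)
  refine ⟨(j : Int), ?_, ?_⟩
  · rw [PySem.List.mem_pyRange_one]
    constructor
    · exact Int.natCast_nonneg j
    · simp [PySem.Str.len_eq]
      exact_mod_cast hjlt
  · apply String.toList_injective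
    rw [PySem.Str.toList_slice, PySem.Chars.slice_eq_listSlice]
    have hlen : PySem.Str.len k = (k.toList.length : Int) := by
      simp [PySem.Str.len_eq]
    rw [hlen, PySem.List.slice_natCast_add]
    exact ((List.prefix_iff_eq_take.mp hj).symm)

theorem pvBest_le_pvPri (h : String) : pvBest h ≤ pvPri h := by
  have hle7 : pvBest h ≤ 7 := foldl_pvInner_le h _ 7
  have key : ∀ kp : String × Nat, kp ∈ pvKw → PySem.Str.isIn kp.1 h = true →
      pvBest h ≤ kp.2 := by
    intro kp hmem hocc
    have hk : kp.1 ≠ "" := by fin_cases hmem <;> decide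
    obtain ⟨i, hi, hm⟩ := match_of_occ h kp.1 hk hocc
    exact pvBest_le_of_match h i kp hi hmem hm
  unfold pvPri
  split_ifs with h0 h1 h2 h3 h4 h5 h6
  · simp only [List.any_eq_true] at h0
    obtain ⟨w, hw, hocc⟩ := h0
    fin_cases hw
    · exact key ("walmart", 0) (by decide) hocc
    · exact key ("target", 0) (by decide) hocc
    · exact key ("kroger", 0) (by decide) hocc
    · exact key ("safeway", 0) (by decide) hocc
    · exact key ("albertsons", 0) (by decide) hocc
    · exact key ("chef", 0) (by decide) hocc
    · exact key ("us foods", 0) (by decide) hocc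
  · exact key ("club", 1) (by decide) h1
  · rcases Bool.or_eq_true_iff.mp h2 with h' | hd
    · rcases Bool.or_eq_true_iff.mp h' with h'' | hs
      · rcases Bool.or_eq_true_iff.mp h'' with hc | hch
        · exact key ("chip", 2) (by decide) hc
        · exact key ("chicharr", 2) (by decide) hch
      · exact key ("salsa", 2) (by decide) hs
    · exact key ("dip", 2) (by decide) hd
  · exact key ("tostad", 3) (by decide) h3
  · exact key ("wrap", 4) (by decide) h4
  · rcases Bool.or_eq_true_iff.mp h5 with hc | hm
    · exact key ("corn", 5) (by decide) hc
    · exact key ("maiz", 5) (by decide) hm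
  · rcases Bool.or_eq_true_iff.mp h6 with hf | hw
    · exact key ("flour", 6) (by decide) hf
    · exact key ("wheat", 6) (by decide) hw
  · exact hle7

theorem pvBest_eq_pvPri (h : String) : pvBest h = pvPri h :=
  Nat.le_antisymm (pvBest_le_pvPri h) (pvPri_le_pvBest h)

-- ===== VERDICT =====
theorem infer_category_from_header_py_spec : Claim_equal_infer_category_from_header_py := by
  intro header _
  unfold Spec_infer_category_from_header_py infer_category_from_header_py
    infer_category_from_header_py_alt
  simp only
  rw [pvBest_eq_pvPri]
  set h := PySem.Str.lower (PySem.Str.strip (if header = "" then "" else header)) with hh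
  by_cases h0 : h = ""
  · rw [h0]
    decide
  · simp only [h0, if_false]
    unfold pvPri
    split_ifs <;> first | rfl | omega
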